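-- pv_equiv track=rewrite | github.com/khawarzia/edi | profileinfo/views.py | convertit
-- ===== SOURCE A (Python) =====
-- def convertit(a):
--     b = ''
--     for i in a:
--         if i == '\n':
--             break
--         if i == ' ':
--             b = b + '-'
--         else:
--             b = b + i
--     return b
-- ===== SOURCE B (Python) =====
-- def convertit(a):
--     return a.split('\n', 1)[0].replace(' ', '-')
-- ===== Notes on version B (the rewrite author's own statement) =====
-- stated objective: idiomatic
-- what changed: Replaced the explicit character-accumulator loop with per-character branching by a one-liner: cut at the first newline with split('\n', 1)[0], then replace spaces with dashes via str.replace.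
import Mathlib
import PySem

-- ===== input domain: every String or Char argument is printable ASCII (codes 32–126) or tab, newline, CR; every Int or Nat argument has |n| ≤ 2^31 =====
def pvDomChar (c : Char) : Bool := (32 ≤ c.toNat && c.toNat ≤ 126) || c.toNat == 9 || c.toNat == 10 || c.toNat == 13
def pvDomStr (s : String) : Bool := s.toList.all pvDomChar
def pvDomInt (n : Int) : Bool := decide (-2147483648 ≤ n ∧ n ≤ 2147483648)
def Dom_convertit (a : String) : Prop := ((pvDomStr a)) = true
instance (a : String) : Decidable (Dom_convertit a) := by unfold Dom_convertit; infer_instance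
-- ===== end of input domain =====

-- B replaces A's explicit accumulator loop by the idiomatic split('\n',1)[0].replace(' ','-') one-liner.

-- ===== PORT A =====
-- the for-loop with break: structural recursion over the characters, accumulator b
def convertitLoop (cs : List Char) (b : String) : String :=
  match cs with
  | [] => b
  | i :: rest =>
      if i = '\n' then b
      else if i = ' ' then convertitLoop rest (b ++ "-")
      else convertitLoop rest (b.push i)

def convertit (a : String) : String := convertitLoop a.toList ""

-- ===== PORT B =====
def convertit_alt (a : String) : String :=
  match PySem.Str.splitMax? a "\n" 1 with
  | some (h :: _) => PySem.Str.replace h " " "-"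
  | _ => ""   -- unreachable: sep ≠ "" gives some, and split always yields ≥ 1 piece

-- ===== PRECONDITION & SPEC =====
def Spec_convertit (a : String) (out : String) : Prop := out = convertit_alt a
instance (a : String) (out : String) : Decidable (Spec_convertit a out) := by unfold Spec_convertit; infer_instance

-- ===== CLAIM (what is proved, stated in full; the proofs are below) =====
def Claim_equal_convertit : Prop := ∀ (a : String), Dom_convertit a → Spec_convertit a (convertit a)

-- ===== LEMMAS AND PROOFS =====

def pvDash (c : Char) : Char := if c = ' ' then '-' else c

theorem convertitLoop_toList (cs : List Char) (b : String) :
    (convertitLoop cs b).toList = b.toList ++ (cs.takeWhile (· ≠ '\n')).map pvDash := by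
  induction cs generalizing b with
  | nil => simp [convertitLoop]
  | cons i rest ih =>
      by_cases h : i = '\n'
      · simp [convertitLoop, h, List.takeWhile]
      · by_cases hs : i = ' '
        · simp [convertitLoop, hs, List.takeWhile, ih, pvDash]
        · simp [convertitLoop, h, hs, List.takeWhile, ih, pvDash]

theorem go_m0 (sep : List Char) (fuel : Nat) (l cur : List Char) (acc : List (List Char)) :
    PySem.Chars.splitOnMax.go sep fuel 0 l cur acc = ((cur.reverse ++ l) :: acc).reverse := by
  cases fuel with
  | zero => rfl
  | succ f => cases l <;> simp [PySem.Chars.splitOnMax.go]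

theorem go_head (l cur : List Char) (fuel : Nat) (hf : l.length ≤ fuel) :
    ∃ rest, PySem.Chars.splitOnMax.go ['\n'] fuel 1 l cur [] =
      (cur.reverse ++ l.takeWhile (· ≠ '\n')) :: rest := by
  induction l generalizing fuel cur with
  | nil => cases fuel <;> exact ⟨[], by simp [PySem.Chars.splitOnMax.go]⟩
  | cons c rest ih =>
      cases fuel with
      | zero => simp at hf
      | succ f =>
          by_cases h : c = '\n'
          · refine ⟨[rest], ?_⟩
            simp [PySem.Chars.splitOnMax.go, h, List.isPrefixOf, go_m0, List.takeWhile]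
          · obtain ⟨r, hr⟩ := ih (c :: cur) f (by simpa using Nat.lt_succ_iff.mp (Nat.lt_of_lt_of_le (Nat.lt_succ_self _) hf))
            refine ⟨r, ?_⟩
            simp [PySem.Chars.splitOnMax.go, List.isPrefixOf, Ne.symm h, hr, List.takeWhile, h]

theorem replaceGo_space (l : List Char) (fuel : Nat) (acc : List Char) (hf : l.length ≤ fuel) :
    PySem.Chars.replace.go [' '] ['-'] fuel l acc = acc.reverse ++ l.map pvDash := by
  induction l generalizing fuel acc with
  | nil => cases fuel <;> simp [PySem.Chars.replace.go]
  | cons c t ih =>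
      cases fuel with
      | zero => simp at hf
      | succ f =>
          have hft : t.length ≤ f := by simpa using hf
          by_cases h : c = ' '
          · simp [PySem.Chars.replace.go, List.isPrefixOf, h, ih _ _ hft, pvDash]
          · simp [PySem.Chars.replace.go, List.isPrefixOf, Ne.symm h, ih _ _ hft, pvDash, h]

theorem replace_space (l : List Char) :
    PySem.Chars.replace l [' '] ['-'] = l.map pvDash := by
  simp [PySem.Chars.replace, replaceGo_space l l.length [] le_rfl]

-- ===== VERDICT (by name: the statement is the Claim_ definition above) =====
theorem convertit_spec : Claim_equal_convertit := by
  intro a _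
  unfold Spec_convertit convertit convertit_alt
  obtain ⟨rest, hrest⟩ := go_head a.toList [] (a.length + 1) (by simp)
  simp [PySem.Str.splitMax?, PySem.Chars.splitMax?, PySem.Chars.splitOnMax, hrest,
    PySem.Str.replace, replace_space]
  apply String.toList_injective
  simp [convertitLoop_toList]
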